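-- pv_equiv track=rewrite | github.com/diy3d-de/HA-EcoTrackerIR | custom_components/everhome_ecotracker/sensor.py | _humanize_key
-- ===== SOURCE A (Python) =====
-- def _humanize_key(key: str) -> str:
--     """Turn an API key into a readable fallback name."""
--     label = key.replace("_", " ")
--     chars: list[str] = []
--     for char in label:
--         if char.isupper() and chars:
--             chars.append(" ")
--         chars.append(char)
--     return " ".join("".join(chars).split()).title()
-- ===== SOURCE B (Python) =====
-- def _humanize_key(key: str) -> str:
--     """Turn an API key into a readable fallback name."""
--     words: list[str] = []
--     cur: list[str] = []
--     for ch in key: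
--         if ch == "_" or ch.isspace():
--             if cur:
--                 words.append("".join(cur))
--                 cur = []
--         elif ch.isupper():
--             if cur:
--                 words.append("".join(cur))
--             cur = [ch]
--         else:
--             cur.append(ch)
--     if cur:
--         words.append("".join(cur))
--     return " ".join(words).title()
-- ===== Notes on version B (the rewrite author's own statement) =====
-- stated objective: alternative
-- what changed: B tokenizes the key in a single pass, starting a new word at an underscore, whitespace or an uppercase letter and collecting the word list directly, instead of A's insert-spaces-then-split()-then-rejoin pipeline.
import Mathlib
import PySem

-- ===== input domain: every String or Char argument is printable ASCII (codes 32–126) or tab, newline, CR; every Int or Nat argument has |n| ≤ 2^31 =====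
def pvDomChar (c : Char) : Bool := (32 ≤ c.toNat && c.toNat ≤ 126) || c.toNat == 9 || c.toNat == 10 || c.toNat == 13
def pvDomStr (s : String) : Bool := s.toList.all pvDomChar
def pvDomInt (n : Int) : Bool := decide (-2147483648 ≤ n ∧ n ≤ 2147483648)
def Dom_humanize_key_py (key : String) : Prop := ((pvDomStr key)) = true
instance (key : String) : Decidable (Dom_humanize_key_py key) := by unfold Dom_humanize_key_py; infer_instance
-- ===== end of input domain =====

-- B builds the word list in one pass (a new word starts at '_', whitespace or an uppercase
-- letter) instead of inserting spaces and regrouping with split(); objective: alternative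
-- decomposition, same cost.

-- ===== PORT A =====
-- str.title() has no PySem primitive: ported by hand; exact on the ASCII domain, where a
-- "cased" character is exactly an ASCII letter (PySem.Chars.isalpha).
def pyTitle : List Char → Bool → List Char
  | [], _ => []
  | c :: rest, prevCased =>
      (if PySem.Chars.isalpha c then
        (if prevCased then PySem.Chars.lowerChar c else PySem.Chars.upperChar c)
       else c) :: pyTitle rest (PySem.Chars.isalpha c)

def humanize_key_py (key : String) : String :=
  let label := PySem.Chars.replace key.toList ['_'] [' ']
  let chars := label.foldl
    (fun acc c => (if PySem.Chars.isupper c && !acc.isEmpty then acc ++ [' '] else acc) ++ [c]) []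
  String.ofList (pyTitle (PySem.Chars.join [' '] (PySem.Chars.split₀ chars)) false)

-- ===== PORT B =====
def bStep (st : List (List Char) × List Char) (ch : Char) : List (List Char) × List Char :=
  if ch = '_' || PySem.Chars.isspace ch then
    (if !st.2.isEmpty then st.1 ++ [st.2] else st.1, [])
  else if PySem.Chars.isupper ch then
    (if !st.2.isEmpty then st.1 ++ [st.2] else st.1, [ch])
  else (st.1, st.2 ++ [ch])

def humanize_key_py_alt (key : String) : String :=
  let st := key.toList.foldl bStep ([], [])
  let words := if !st.2.isEmpty then st.1 ++ [st.2] else st.1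
  String.ofList (pyTitle (PySem.Chars.join [' '] words) false)

-- ===== PRECONDITION & SPEC =====
def Spec_humanize_key_py (key : String) (out : String) : Prop := out = humanize_key_py_alt key
instance (key : String) (out : String) : Decidable (Spec_humanize_key_py key out) := by unfold Spec_humanize_key_py; infer_instance

-- ===== CLAIM (what is proved, stated in full; the proofs are below) =====
def Claim_equal_humanize_key_py : Prop := ∀ (key : String), Dom_humanize_key_py key → Spec_humanize_key_py key (humanize_key_py key)

-- ===== LEMMAS AND PROOFS =====

-- one emitted chunk per ORIGINAL key character, after A's '_'→' ' substitution and
-- space-insertion before uppercase letters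
def emitChunk (c : Char) : List Char :=
  if c = '_' then [' '] else if PySem.Chars.isupper c then [' ', c] else [c]

-- A's space-insertion chunk (on the already-substituted label)
def stepChunk (c : Char) : List Char :=
  if PySem.Chars.isupper c then [' ', c] else [c]

theorem isupper_not_isspace (c : Char) (h : PySem.Chars.isupper c = true) :
    PySem.Chars.isspace c = false := by
  simp only [PySem.Chars.isupper, Bool.and_eq_true, decide_eq_true_eq, Char.le_def,
    UInt32.le_iff_toNat_le] at h
  have hA : ('A' : Char).val.toNat = 65 := rfl
  have hZ : ('Z' : Char).val.toNat = 90 := rfl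
  simp only [PySem.Chars.isspace, Bool.or_eq_false_iff, Bool.and_eq_false_iff,
    decide_eq_false_iff_not, Char.toNat]
  omega

theorem isspace_not_isupper (c : Char) (h : PySem.Chars.isspace c = true) :
    PySem.Chars.isupper c = false := by
  by_contra hu
  simp only [Bool.not_eq_false] at hu
  rw [isupper_not_isspace c hu] at h
  simp at h

theorem emit_space (c : Char) (h1 : c ≠ '_') (h2 : PySem.Chars.isspace c = true) :
    emitChunk c = [c] := by
  simp [emitChunk, h1, isspace_not_isupper c h2]

theorem emit_upper (c : Char) (h1 : c ≠ '_') (h3 : PySem.Chars.isupper c = true) :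
    emitChunk c = [' ', c] := by
  simp [emitChunk, h1, h3]

theorem emit_other (c : Char) (h1 : c ≠ '_') (h3 : PySem.Chars.isupper c = false) :
    emitChunk c = [c] := by
  simp [emitChunk, h1, h3]

theorem bStep_sep (words : List (List Char)) (cur : List Char) (c : Char)
    (h : c = '_' ∨ PySem.Chars.isspace c = true) :
    bStep (words, cur) c = (if !cur.isEmpty then words ++ [cur] else words, []) := by
  simp only [bStep]
  rw [if_pos (by rcases h with h | h <;> simp [h])]

theorem bStep_upper (words : List (List Char)) (cur : List Char) (c : Char)
    (h1 : c ≠ '_') (h3 : PySem.Chars.isupper c = true) :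
    bStep (words, cur) c = (if !cur.isEmpty then words ++ [cur] else words, [c]) := by
  simp [bStep, h1, isupper_not_isspace c h3, h3]

theorem bStep_other (words : List (List Char)) (cur : List Char) (c : Char)
    (h1 : c ≠ '_') (h2 : PySem.Chars.isspace c = false) (h3 : PySem.Chars.isupper c = false) :
    bStep (words, cur) c = (words, cur ++ [c]) := by
  simp [bStep, h1, h2, h3]

theorem go_cons (c : Char) (t cur : List Char) (acc : List (List Char)) :
    PySem.Chars.split₀.go (c :: t) cur acc
      = if PySem.Chars.isspace c then
          (if cur.isEmpty then PySem.Chars.split₀.go t [] acc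
           else PySem.Chars.split₀.go t [] (cur.reverse :: acc))
        else PySem.Chars.split₀.go t (c :: cur) acc := by
  simp [PySem.Chars.split₀.go]

theorem replace_go_underscore (fuel : Nat) (l acc : List Char) (hf : l.length ≤ fuel) :
    PySem.Chars.replace.go ['_'] [' '] fuel l acc
      = acc.reverse ++ l.map (fun c => if c = '_' then ' ' else c) := by
  induction fuel generalizing l acc with
  | zero =>
    cases l with
    | nil => simp [PySem.Chars.replace.go]
    | cons c t => simp at hf
  | succ n ih =>
    cases l with
    | nil => simp [PySem.Chars.replace.go]
    | cons c t =>
      simp only [PySem.Chars.replace.go]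
      by_cases hc : c = '_'
      · subst hc
        rw [if_pos (by simp [List.isPrefixOf])]
        rw [ih _ _ (by simpa using Nat.le_of_succ_le_succ (by simpa using hf))]
        simp
      · rw [if_neg (by simp [List.isPrefixOf]; exact fun h => absurd h.symm hc)]
        rw [ih _ _ (by simpa using Nat.le_of_succ_le_succ (by simpa using hf))]
        simp [hc]

theorem replace_underscore (cs : List Char) :
    PySem.Chars.replace cs ['_'] [' '] = cs.map (fun c => if c = '_' then ' ' else c) := by
  simp only [PySem.Chars.replace]
  rw [if_neg (by simp)]
  simpa using replace_go_underscore cs.length cs [] le_rfl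

theorem foldA_of_ne_nil (l : List Char) (acc : List Char) (h : acc ≠ []) :
    l.foldl (fun acc c =>
        (if PySem.Chars.isupper c && !acc.isEmpty then acc ++ [' '] else acc) ++ [c]) acc
      = acc ++ l.flatMap stepChunk := by
  induction l generalizing acc with
  | nil => simp
  | cons c t ih =>
    simp only [List.foldl_cons, List.flatMap_cons]
    have hne : acc.isEmpty = false := by simpa [List.isEmpty_iff] using h
    cases hu : PySem.Chars.isupper c
    · rw [if_neg (by simp), ih _ (by simp)]
      simp [stepChunk, hu]
    · rw [if_pos (by simp [hne]), ih _ (by simp)]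
      simp [stepChunk, hu]


theorem stepChunk_subst (c : Char) :
    stepChunk (if c = '_' then ' ' else c) = emitChunk c := by
  by_cases hc : c = '_'
  · subst hc; rfl
  · simp [stepChunk, emitChunk, hc]

-- the main tokenizer invariant: running split₀'s worker over A's expanded chunk stream
-- from a state mirroring B's (words, cur) produces exactly B's final word list
theorem main_inv (l : List Char) (words : List (List Char)) (cur : List Char) :
    PySem.Chars.split₀.go (l.flatMap emitChunk) cur.reverse words.reverse
      = (let st := l.foldl bStep (words, cur);
         if !st.2.isEmpty then st.1 ++ [st.2] else st.1) := by
  induction l generalizing words cur with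
  | nil =>
    cases cur with
    | nil => simp [PySem.Chars.split₀.go]
    | cons a t => simp [PySem.Chars.split₀.go]
  | cons c rest ih =>
    simp only [List.flatMap_cons, List.foldl_cons]
    have flush : PySem.Chars.split₀.go (rest.flatMap emitChunk) []
          ((if !cur.isEmpty then words ++ [cur] else words).reverse)
        = (let st := rest.foldl bStep ((if !cur.isEmpty then words ++ [cur] else words), []);
           if !st.2.isEmpty then st.1 ++ [st.2] else st.1) := by
      simpa using ih (if !cur.isEmpty then words ++ [cur] else words) []
    by_cases hsep : c = '_' ∨ PySem.Chars.isspace c = true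
    · rw [bStep_sep words cur c hsep]
      have hspc : (emitChunk c).head? = some ' ' ∨ emitChunk c = [c] ∧ PySem.Chars.isspace c = true := by
        rcases hsep with h | h
        · subst h; left; rfl
        · by_cases h1 : c = '_'
          · subst h1; left; rfl
          · right; exact ⟨emit_space c h1 h, h⟩
      have key : PySem.Chars.split₀.go (emitChunk c ++ rest.flatMap emitChunk) cur.reverse words.reverse
          = if cur.isEmpty then PySem.Chars.split₀.go (rest.flatMap emitChunk) [] words.reverse
            else PySem.Chars.split₀.go (rest.flatMap emitChunk) [] (cur.reverse.reverse :: words.reverse) := by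
        rcases hspc with h | ⟨h, hs⟩
        · have : emitChunk c = [' '] := by
            rcases hsep with h' | h'
            · subst h'; rfl
            · by_cases h1 : c = '_'
              · subst h1; rfl
              · rw [emit_space c h1 h'] at h ⊢
                simp at h; rw [h]
          rw [this]
          simp only [List.cons_append, List.nil_append]
          rw [go_cons, if_pos (by decide)]
          simp [List.isEmpty_iff]
        · rw [h]
          simp only [List.cons_append, List.nil_append]
          rw [go_cons, if_pos hs]
          simp [List.isEmpty_iff]
      rw [key]
      by_cases hc : cur = []
      · subst hc
        simpa using flush
      · rw [if_neg (by simpa [List.isEmpty_iff] using hc)]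
        have heq : cur.reverse.reverse :: words.reverse
            = ((if !cur.isEmpty then words ++ [cur] else words)).reverse := by
          simp [hc]
        rw [heq, flush]
    · have h1 : c ≠ '_' := fun h => hsep (Or.inl h)
      have h2' : PySem.Chars.isspace c = false := by
        cases h : PySem.Chars.isspace c
        · rfl
        · exact absurd (Or.inr h) hsep
      by_cases h3 : PySem.Chars.isupper c = true
      · rw [bStep_upper words cur c h1 h3, emit_upper c h1 h3]
        simp only [List.cons_append, List.nil_append]
        rw [go_cons, if_pos (by decide)]
        by_cases hc : cur = []
        · subst hc
          rw [if_pos (by decide)]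
          rw [go_cons, if_neg (by simp [h2'])]
          simpa using ih words [c]
        · rw [if_neg (by simpa [List.isEmpty_iff] using hc)]
          rw [go_cons, if_neg (by simp [h2'])]
          have h4 : cur.reverse.reverse :: words.reverse = (words ++ [cur]).reverse := by simp
          rw [h4]
          simpa [List.isEmpty_iff, hc] using ih (words ++ [cur]) [c]
      · have h3' : PySem.Chars.isupper c = false := by
          cases h : PySem.Chars.isupper c
          · rfl
          · exact absurd h h3
        rw [bStep_other words cur c h1 h2' h3', emit_other c h1 h3']
        simp only [List.cons_append, List.nil_append]
        rw [go_cons, if_neg (by simp [h2'])]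
        have h4 : c :: cur.reverse = (cur ++ [c]).reverse := by simp
        rw [h4]
        exact ih words (cur ++ [c])

-- the word lists of the two ports coincide
theorem tokens_eq (key : String) :
    PySem.Chars.split₀
        ((PySem.Chars.replace key.toList ['_'] [' ']).foldl
          (fun acc c => (if PySem.Chars.isupper c && !acc.isEmpty then acc ++ [' '] else acc) ++ [c]) [])
      = (let st := key.toList.foldl bStep ([], []);
         if !st.2.isEmpty then st.1 ++ [st.2] else st.1) := by
  rw [replace_underscore]
  have full := main_inv key.toList [] []
  simp only [List.reverse_nil] at full
  cases hk : key.toList with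
  | nil => simp [PySem.Chars.split₀, PySem.Chars.split₀.go]
  | cons c rest =>
    rw [hk] at full
    simp only [List.map_cons, List.foldl_cons, List.flatMap_cons] at full ⊢
    rw [show ((if PySem.Chars.isupper (if c = '_' then ' ' else c) && !(List.isEmpty ([] : List Char))
          then ([] : List Char) ++ [' '] else []) ++ [if c = '_' then ' ' else c])
        = [if c = '_' then ' ' else c] from by simp]
    rw [foldA_of_ne_nil _ [if c = '_' then ' ' else c] (by simp)]
    have hfm : (rest.map (fun c => if c = '_' then ' ' else c)).flatMap stepChunk
        = rest.flatMap emitChunk := by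
      rw [List.flatMap_map]
      exact List.flatMap_congr (fun x _ => stepChunk_subst x)
    rw [hfm]
    simp only [List.singleton_append]
    -- A never inserts a space before the FIRST character; split₀ ignores a leading space,
    -- so the full flatMap stream tokenizes identically
    have hhead : PySem.Chars.split₀ ((if c = '_' then ' ' else c) :: rest.flatMap emitChunk)
        = PySem.Chars.split₀.go (emitChunk c ++ rest.flatMap emitChunk) [] [] := by
      by_cases h1 : c = '_'
      · subst h1; rfl
      · by_cases h3 : PySem.Chars.isupper c = true
        · rw [emit_upper c h1 h3]
          simp only [if_neg h1, PySem.Chars.split₀, List.cons_append, List.nil_append]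
          rw [go_cons ' ', if_pos (by decide), if_pos (by decide)]
        · have h3' : PySem.Chars.isupper c = false := by
            cases h : PySem.Chars.isupper c
            · rfl
            · exact absurd h h3
          rw [emit_other c h1 h3']
          simp [if_neg h1, PySem.Chars.split₀]
    rw [hhead, full]

-- ===== VERDICT (by name: the statement is the Claim_ definition above) =====
theorem humanize_key_py_spec : Claim_equal_humanize_key_py := by
  intro key _
  show humanize_key_py key = humanize_key_py_alt key
  unfold humanize_key_py humanize_key_py_alt
  simp only [tokens_eq]
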